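-- pv_equiv track=rewrite | github.com/ellipse-science/vitrine_pipeline | code/python/3_metrics_jsonl_llm.py | construire_matrice_interannotateurs
-- ===== SOURCE A (Python) =====
-- import itertools
--
-- def construire_matrice_interannotateurs(global_dict, label):
--     """
--     Construit une matrice de jugements (list of list) pour le calcul
--     de Krippendorff’s Alpha sur un label donné.
--     Chaque colonne correspond à un annotateur, chaque ligne correspond à un texte.
--
--     On encode 1 si l'annotateur a attribué le label, 0 sinon.
--
--     Parameters
--     ----------
--     global_dict : dict
--         { text : { annotateur_id : set(labels), ...}, ...}
--     label : str
--         Le label pour lequel on veut construire la matrice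
--
--     Returns
--     -------
--     data_matrix : list of list
--         data_matrix[i][j] = 1 ou 0
--     annotateurs : list
--         Liste ordonnée des annotateurs (colonnes)
--     textes : list
--         Liste ordonnée des textes (lignes)
--     """
--     annotateurs = sorted(
--         set(itertools.chain.from_iterable(
--             [ann_dict.keys() for ann_dict in global_dict.values()]
--         ))
--     )
--     textes = sorted(global_dict.keys())
--
--     data_matrix = []
--     for txt in textes:
--         row = []
--         for ann in annotateurs:
--             labels_annot = global_dict[txt].get(ann, set())
--             val = 1 if label in labels_annot else 0
--             row.append(val)
--         data_matrix.append(row)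
--
--     return data_matrix, annotateurs, textes
-- ===== SOURCE B (Python) =====
-- def construire_matrice_interannotateurs(global_dict, label):
--     annotateurs = sorted({ann for d in global_dict.values() for ann in d})
--     textes = sorted(global_dict)
--     col = {a: j for j, a in enumerate(annotateurs)}
--     row = {t: i for i, t in enumerate(textes)}
--     data_matrix = [[0] * len(annotateurs) for _ in textes]
--     for txt, d in global_dict.items():
--         i = row[txt]
--         for ann, labels in d.items():
--             if label in labels:
--                 data_matrix[i][col[ann]] = 1
--     return data_matrix, annotateurs, textes
-- ===== Notes on version B (the rewrite author's own statement) =====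
-- stated objective: faster
-- what changed: Instead of scanning the full textes x annotateurs grid with a dict lookup per cell, B allocates a zero matrix and scatters 1s in a single pass over global_dict.items() using precomputed row/column position maps; Pre_ requires the outer and inner association lists to have unique keys, since they encode Python dicts, which cannot hold duplicate keys, so no representable Python input is excluded.
import Mathlib
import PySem

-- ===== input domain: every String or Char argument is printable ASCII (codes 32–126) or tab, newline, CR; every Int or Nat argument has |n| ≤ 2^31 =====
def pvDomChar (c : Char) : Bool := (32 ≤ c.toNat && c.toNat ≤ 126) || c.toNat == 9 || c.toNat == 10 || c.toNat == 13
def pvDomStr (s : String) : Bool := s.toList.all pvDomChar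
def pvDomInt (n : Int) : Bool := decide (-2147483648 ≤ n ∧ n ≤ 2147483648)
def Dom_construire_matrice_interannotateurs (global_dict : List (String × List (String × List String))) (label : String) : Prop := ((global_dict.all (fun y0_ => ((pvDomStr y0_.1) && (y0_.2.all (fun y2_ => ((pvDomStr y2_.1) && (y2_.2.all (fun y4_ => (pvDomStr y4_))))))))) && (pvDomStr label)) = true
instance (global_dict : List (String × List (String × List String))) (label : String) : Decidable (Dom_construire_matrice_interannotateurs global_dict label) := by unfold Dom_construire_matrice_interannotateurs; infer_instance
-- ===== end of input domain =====

-- B scatters 1s over a pre-allocated zero matrix in one pass over the items, instead of A's dense per-cell dict lookups.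

-- ===== PORT A =====
def construire_matrice_interannotateurs (global_dict : List (String × List (String × List String))) (label : String) : List (List Int) × List String × List String :=
  let g := PySem.Dict.mk global_dict
  let annotateurs := PySem.List.sorted (PySem.Set.ofList ((g.values.map (fun ann_dict => (PySem.Dict.mk ann_dict).keys)).flatten)) (fun x => x) false
  let textes := PySem.List.sorted g.keys (fun x => x) false
  let data_matrix := textes.foldl (fun acc txt =>
    let row := annotateurs.foldl (fun row ann =>
      -- global_dict[txt] cannot raise: txt ranges over the keys, so getD is exact here
      let labels_annot := (PySem.Dict.mk (g.getD txt [])).getD ann []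
      let val : Int := if label ∈ labels_annot then 1 else 0
      row ++ [val]) []
    acc ++ [row]) []
  (data_matrix, annotateurs, textes)

-- ===== PORT B =====
def construire_matrice_interannotateurs_alt (global_dict : List (String × List (String × List String))) (label : String) : List (List Int) × List String × List String :=
  let annotateurs := PySem.List.sorted (PySem.Set.ofList (global_dict.flatMap (fun p => p.2.map Prod.fst))) (fun x => x) false
  let textes := PySem.List.sorted (global_dict.map Prod.fst) (fun x => x) false
  -- enumerate yields nonnegative indices, so .toNat is exact
  let col := (PySem.List.enumerate annotateurs).foldl (fun d p => d.insert p.2 p.1.toNat) PySem.Dict.empty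
  let row := (PySem.List.enumerate textes).foldl (fun d p => d.insert p.2 p.1.toNat) PySem.Dict.empty
  let data_matrix := global_dict.foldl (fun m p =>
    -- row[txt]/col[ann] cannot raise and the indices are always in range, so getD is exact
    let i := row.getD p.1 0
    p.2.foldl (fun m q =>
      if label ∈ q.2 then m.set i ((m.getD i []).set (col.getD q.1 0) 1) else m) m)
    (textes.map (fun _ => List.replicate annotateurs.length (0 : Int)))
  (data_matrix, annotateurs, textes)

-- ===== PRECONDITION & SPEC =====
-- Pre_ requires unique keys in the outer and inner association lists: they encode Python dicts, which cannot hold duplicate keys, so no representable Python input is excluded.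
def Pre_construire_matrice_interannotateurs (global_dict : List (String × List (String × List String))) (label : String) : Prop :=
  (global_dict.map Prod.fst).Nodup ∧ ∀ p ∈ global_dict, (p.2.map Prod.fst).Nodup
instance (global_dict : List (String × List (String × List String))) (label : String) : Decidable (Pre_construire_matrice_interannotateurs global_dict label) := by unfold Pre_construire_matrice_interannotateurs; infer_instance

def pvWitness_construire_matrice_interannotateurs : (List (String × List (String × List String))) × String :=
  ([("t2", [("a1", ["pos"]), ("a2", [])]), ("t1", [("a1", ["neg"])])], "pos")

def Spec_construire_matrice_interannotateurs (global_dict : List (String × List (String × List String))) (label : String) (out : List (List Int) × List String × List String) : Prop := out = construire_matrice_interannotateurs_alt global_dict label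
instance (global_dict : List (String × List (String × List String))) (label : String) (out : List (List Int) × List String × List String) : Decidable (Spec_construire_matrice_interannotateurs global_dict label out) := by unfold Spec_construire_matrice_interannotateurs; infer_instance

-- ===== CLAIM (what is proved, stated in full; the proofs are below) =====
def Claim_equal_construire_matrice_interannotateurs : Prop := ∀ (global_dict : List (String × List (String × List String))) (label : String), Dom_construire_matrice_interannotateurs global_dict label → Pre_construire_matrice_interannotateurs global_dict label → Spec_construire_matrice_interannotateurs global_dict label (construire_matrice_interannotateurs global_dict label)

-- ===== LEMMAS AND PROOFS =====

def pvE (m : List (List Int)) (i j : Nat) : Int := (m.getD i []).getD j 0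
def pvShape (m : List (List Int)) (n c : Nat) : Prop := m.length = n ∧ ∀ r ∈ m, r.length = c

theorem pvGetD_eq (m : List (List Int)) (i : Nat) (hi : i < m.length) : m.getD i [] = m[i] := by
  simp [List.getD_eq_getElem?_getD, List.getElem?_eq_getElem hi]

theorem pvShape_set (m : List (List Int)) (n c : Nat) (hm : pvShape m n c) (i j : Nat)
    (hi : i < m.length) : pvShape (m.set i ((m.getD i []).set j 1)) n c := by
  obtain ⟨h1, h2⟩ := hm
  refine ⟨by simpa using h1, ?_⟩
  intro r hr
  rcases List.mem_or_eq_of_mem_set hr with h | h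
  · exact h2 r h
  · subst h
    rw [pvGetD_eq m i hi]
    simpa using h2 _ (List.getElem_mem hi)

theorem pvE_set (m : List (List Int)) (i j i' j' : Nat) (hi : i < m.length) :
    pvE (m.set i ((m.getD i []).set j 1)) i' j'
      = if i' = i ∧ j' = j ∧ j < (m.getD i []).length then 1 else pvE m i' j' := by
  unfold pvE
  simp only [List.getD_eq_getElem?_getD]
  by_cases hii : i' = i
  · subst hii
    rw [List.getElem?_set_self (by simpa using hi)]
    by_cases hjj : j' = j
    · subst hjj
      by_cases hj : j' < (m.getD i' []).length
      all_goals simp only [List.getD_eq_getElem?_getD] at hj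
      · rw [Option.getD_some, List.getElem?_set_self (by simpa using hj)]
        simp [hj]
      · rw [List.set_eq_of_length_le (by omega)]
        simp [hj]
    · rw [Option.getD_some, List.getElem?_set_ne (by omega)]
      simp [hjj]
  · rw [List.getElem?_set_ne (by omega)]
    simp [hii]

theorem pvInner_spec (label : String) (col : PySem.Dict String Nat) (i c : Nat)
    (d : List (String × List String)) :
    ∀ (m : List (List Int)) (n : Nat), pvShape m n c → i < n → (∀ q ∈ d, col.getD q.1 0 < c) →
      pvShape (d.foldl (fun m q => if label ∈ q.2 then m.set i ((m.getD i []).set (col.getD q.1 0) 1) else m) m) n c ∧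
      ∀ i' j', pvE (d.foldl (fun m q => if label ∈ q.2 then m.set i ((m.getD i []).set (col.getD q.1 0) 1) else m) m) i' j'
        = if i' = i ∧ ∃ q ∈ d, label ∈ q.2 ∧ col.getD q.1 0 = j' then 1 else pvE m i' j' := by
  induction d with
  | nil => intro m n hm hi _; exact ⟨hm, fun i' j' => by simp⟩
  | cons q rest ih =>
    intro m n hm hi hcol
    have hL : m.length = n := hm.1
    have hstep : pvShape (if label ∈ q.2 then m.set i ((m.getD i []).set (col.getD q.1 0) 1) else m) n c := by
      by_cases hq : label ∈ q.2
      · simpa [hq] using pvShape_set m n c hm i _ (by omega)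
      · simpa [hq] using hm
    have hrowlen : (m.getD i []).length = c := by
      rw [pvGetD_eq m i (by omega)]
      exact hm.2 _ (List.getElem_mem _)
    obtain ⟨ihS, ihE⟩ := ih (if label ∈ q.2 then m.set i ((m.getD i []).set (col.getD q.1 0) 1) else m) n hstep hi
      (fun q hq => hcol q (List.mem_cons_of_mem _ hq))
    refine ⟨by simpa using ihS, ?_⟩
    intro i' j'
    rw [List.foldl_cons, ihE i' j']
    by_cases hq : label ∈ q.2
    · simp only [if_pos hq]
      rw [pvE_set m i (col.getD q.1 0) i' j' (by omega)]
      by_cases h1 : i' = i ∧ ∃ q ∈ rest, label ∈ q.2 ∧ col.getD q.1 0 = j'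
      · obtain ⟨he, qq, hqq, hl, hc⟩ := h1
        rw [if_pos ⟨he, qq, hqq, hl, hc⟩, if_pos ⟨he, qq, List.mem_cons_of_mem q hqq, hl, hc⟩]
      · rw [if_neg h1]
        by_cases h2 : i' = i ∧ j' = col.getD q.1 0
        · have : col.getD q.1 0 < c := hcol q (List.mem_cons_self)
          rw [if_pos ⟨h2.1, h2.2, by omega⟩, if_pos ⟨h2.1, q, List.mem_cons_self, hq, h2.2.symm⟩]
        · rw [if_neg (by tauto), if_neg (by
            rintro ⟨he, qq, hqq, hl, hc⟩
            rcases List.mem_cons.mp hqq with h | h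
            · exact h2 ⟨he, by rw [h] at hc; omega⟩
            · exact h1 ⟨he, qq, h, hl, hc⟩)]
    · simp only [if_neg hq]
      by_cases h1 : i' = i ∧ ∃ q ∈ rest, label ∈ q.2 ∧ col.getD q.1 0 = j'
      · obtain ⟨he, qq, hqq, hl, hc⟩ := h1
        rw [if_pos ⟨he, qq, hqq, hl, hc⟩, if_pos ⟨he, qq, List.mem_cons_of_mem q hqq, hl, hc⟩]
      · rw [if_neg h1, if_neg (by
          rintro ⟨he, qq, hqq, hl, hc⟩
          rcases List.mem_cons.mp hqq with h | h
          · exact hq (h ▸ hl)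
          · exact h1 ⟨he, qq, h, hl, hc⟩)]

theorem pvOuter_spec (label : String) (row col : PySem.Dict String Nat) (c : Nat)
    (l : List (String × List (String × List String))) :
    ∀ (m : List (List Int)) (n : Nat), pvShape m n c →
      (∀ p ∈ l, row.getD p.1 0 < n ∧ ∀ q ∈ p.2, col.getD q.1 0 < c) →
      pvShape (l.foldl (fun m p => p.2.foldl (fun m q => if label ∈ q.2 then m.set (row.getD p.1 0) ((m.getD (row.getD p.1 0) []).set (col.getD q.1 0) 1) else m) m) m) n c ∧
      ∀ i' j', pvE (l.foldl (fun m p => p.2.foldl (fun m q => if label ∈ q.2 then m.set (row.getD p.1 0) ((m.getD (row.getD p.1 0) []).set (col.getD q.1 0) 1) else m) m) m) i' j'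
        = if ∃ p ∈ l, row.getD p.1 0 = i' ∧ ∃ q ∈ p.2, label ∈ q.2 ∧ col.getD q.1 0 = j' then 1 else pvE m i' j' := by
  induction l with
  | nil => intro m n hm _; exact ⟨hm, fun i' j' => by simp⟩
  | cons p rest ih =>
    intro m n hm hb
    obtain ⟨hS1, hE1⟩ := pvInner_spec label col (row.getD p.1 0) c p.2 m n hm
      (hb p List.mem_cons_self).1 (hb p List.mem_cons_self).2
    obtain ⟨ihS, ihE⟩ := ih _ n hS1 (fun p hp => hb p (List.mem_cons_of_mem _ hp))
    refine ⟨by simpa using ihS, ?_⟩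
    intro i' j'
    rw [List.foldl_cons, ihE i' j', hE1 i' j']
    by_cases h1 : ∃ p ∈ rest, row.getD p.1 0 = i' ∧ ∃ q ∈ p.2, label ∈ q.2 ∧ col.getD q.1 0 = j'
    · obtain ⟨pp, hpp, hr, hq⟩ := h1
      rw [if_pos ⟨pp, hpp, hr, hq⟩, if_pos ⟨pp, List.mem_cons_of_mem p hpp, hr, hq⟩]
    · rw [if_neg h1]
      by_cases h2 : i' = row.getD p.1 0 ∧ ∃ q ∈ p.2, label ∈ q.2 ∧ col.getD q.1 0 = j'
      · rw [if_pos h2, if_pos ⟨p, List.mem_cons_self, h2.1.symm, h2.2⟩]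
      · rw [if_neg h2, if_neg (by
          rintro ⟨pp, hpp, hr, hq⟩
          rcases List.mem_cons.mp hpp with h | h
          · exact h2 ⟨by rw [h] at hr; omega, by rw [← h]; exact hq⟩
          · exact h1 ⟨pp, h, hr, hq⟩)]

def pvPos (xs : List String) : PySem.Dict String Nat :=
  (PySem.List.enumerate xs).foldl (fun d p => d.insert p.2 p.1.toNat) PySem.Dict.empty

theorem pvPos_items (xs : List String) (h : xs.Nodup) :
    (pvPos xs).items = (PySem.List.enumerate xs).map (fun p => (p.2, p.1.toNat)) := by
  unfold pvPos
  rw [show (fun (d : PySem.Dict String Nat) (p : Int × String) => d.insert p.2 p.1.toNat)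
      = (fun d p => d.insert ((fun (q : Int × String) => q.2) p) ((fun (q : Int × String) => q.1.toNat) p)) from rfl,
    PySem.Dict.items_foldl_insert_fresh (PySem.List.enumerate xs) (fun q => q.2) (fun q => q.1.toNat) PySem.Dict.empty
      (by intro a _; simp [PySem.Dict.contains_empty]) (by simpa [PySem.List.map_snd_enumerate] using h)]
  simp [PySem.Dict.empty]

theorem pvPos_keys (xs : List String) (h : xs.Nodup) : (pvPos xs).keys = xs := by
  simp [PySem.Dict.keys, pvPos_items xs h, List.map_map, Function.comp_def]

theorem pvPos_getD (xs : List String) (h : xs.Nodup) (i : Nat) (hi : i < xs.length) :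
    (pvPos xs).getD xs[i] 0 = i := by
  apply PySem.Dict.getD_of_mem_items
  · rw [pvPos_items xs h]
    refine List.mem_map.mpr ⟨((0:Int) + i, xs[i]), ?_, by simp⟩
    rw [PySem.List.mem_enumerate_iff]
    exact ⟨i, hi, rfl⟩
  · rw [pvPos_keys xs h]; exact h

theorem pvPos_getD_mem (xs : List String) (h : xs.Nodup) (x : String) (hx : x ∈ xs) :
    ∃ i, ∃ (hi : i < xs.length), xs[i] = x ∧ (pvPos xs).getD x 0 = i := by
  obtain ⟨i, hi, he⟩ := List.getElem_of_mem hx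
  exact ⟨i, hi, he, by rw [← he]; exact pvPos_getD xs h i hi⟩

theorem pvHit_iff (gd : List (String × List (String × List String))) (label : String)
    (hnd : (gd.map Prod.fst).Nodup) (hin : ∀ p ∈ gd, (p.2.map Prod.fst).Nodup)
    (textes anns : List String)
    (htx : textes = PySem.List.sorted (gd.map Prod.fst) (fun x => x) false)
    (han : anns = PySem.List.sorted (PySem.Set.ofList (gd.flatMap (fun p => p.2.map Prod.fst))) (fun x => x) false)
    (i j : Nat) (hi : i < textes.length) (hj : j < anns.length) :
    (∃ p ∈ gd, (pvPos textes).getD p.1 0 = i ∧ ∃ q ∈ p.2, label ∈ q.2 ∧ (pvPos anns).getD q.1 0 = j)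
      ↔ label ∈ (PySem.Dict.mk ((PySem.Dict.mk gd).getD textes[i] [])).getD anns[j] [] := by
  have htnd : textes.Nodup := htx ▸ ((PySem.List.sorted_perm _ _ _).nodup_iff.mpr hnd)
  have hand : anns.Nodup := han ▸ ((PySem.List.sorted_perm _ _ _).nodup_iff.mpr (PySem.Set.nodup_ofList _))
  have hmemT : ∀ x, x ∈ gd.map Prod.fst → x ∈ textes := fun x hx => htx ▸ ((PySem.List.mem_sorted _ _ _ x).mpr hx)
  have hmemA : ∀ x, x ∈ gd.flatMap (fun p => p.2.map Prod.fst) → x ∈ anns :=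
    fun x hx => han ▸ ((PySem.List.mem_sorted _ _ _ x).mpr ((PySem.Set.mem_ofList _ x).mpr hx))
  constructor
  · rintro ⟨p, hp, hrow, q, hq, hlab, hcol⟩
    obtain ⟨i', hi', hti', hgi'⟩ := pvPos_getD_mem textes htnd p.1 (hmemT p.1 (List.mem_map_of_mem hp))
    have hpt : textes[i] = p.1 := by rw [← hti']; congr 1; omega
    obtain ⟨j', hj', haj', hgj'⟩ := pvPos_getD_mem anns hand q.1
      (hmemA q.1 (List.mem_flatMap.mpr ⟨p, hp, List.mem_map_of_mem hq⟩))
    have hqa : anns[j] = q.1 := by rw [← haj']; congr 1; omega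
    rw [hpt, hqa]
    rw [PySem.Dict.getD_of_mem_items (PySem.Dict.mk gd) (k := p.1) (v := p.2) (by simpa using hp)
        (by rw [PySem.Dict.keys_mk]; exact hnd)]
    rw [PySem.Dict.getD_of_mem_items (PySem.Dict.mk p.2) (k := q.1) (v := q.2) (by simpa using hq)
        (by rw [PySem.Dict.keys_mk]; exact hin p hp)]
    exact hlab
  · intro hlab
    obtain ⟨x, hxe, hxm⟩ : ∃ x, x = textes[i] ∧ x ∈ textes := ⟨textes[i], rfl, List.getElem_mem hi⟩
    rw [htx, PySem.List.mem_sorted] at hxm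
    obtain ⟨p, hp, hpt'⟩ := List.mem_map.mp hxm
    have hpt : p.1 = textes[i] := hpt'.trans hxe
    have hgd : (PySem.Dict.mk gd).getD textes[i] [] = p.2 := by
      refine PySem.Dict.getD_of_mem_items _ (k := textes[i]) (v := p.2) ?_ (by rw [PySem.Dict.keys_mk]; exact hnd) _
      show (textes[i], p.2) ∈ gd
      rw [← hpt]; simpa using hp
    rw [hgd] at hlab
    by_cases hc : (PySem.Dict.mk p.2).contains anns[j]
    · have hsome : ((PySem.Dict.mk p.2).get? anns[j]).isSome := by
        rw [← PySem.Dict.contains_eq_isSome_get?]; exact hc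
      obtain ⟨ls, hls⟩ := Option.isSome_iff_exists.mp hsome
      have hmem : (anns[j], ls) ∈ p.2 := by
        simpa using PySem.Dict.mem_items_of_get?_eq_some (PySem.Dict.mk p.2) hls
      have hlab2 : label ∈ ls := by
        rwa [PySem.Dict.getD_eq_get?_getD, hls, Option.getD_some] at hlab
      obtain ⟨i', hi', hti', hgi'⟩ := pvPos_getD_mem textes htnd p.1 (hmemT p.1 (List.mem_map_of_mem hp))
      obtain ⟨j', hj', haj', hgj'⟩ := pvPos_getD_mem anns hand anns[j]
        (hmemA anns[j] (List.mem_flatMap.mpr ⟨p, hp, List.mem_map.mpr ⟨(anns[j], ls), hmem, rfl⟩⟩))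
      refine ⟨p, hp, ?_, (anns[j], ls), hmem, hlab2, ?_⟩
      · rw [hgi']
        have : textes[i'] = textes[i] := by rw [hti', hpt]
        exact (List.Nodup.getElem_inj_iff htnd).mp this
      · rw [hgj']
        exact (List.Nodup.getElem_inj_iff hand).mp (by rw [haj'])
    · rw [PySem.Dict.getD_of_not_contains _ _ (Bool.eq_false_iff.mpr hc)] at hlab
      simp at hlab

theorem pvE_zero (textes anns : List String) (i j : Nat) (hi : i < textes.length) :
    pvE (textes.map (fun _ => List.replicate anns.length (0 : Int))) i j = 0 := by
  unfold pvE
  rw [pvGetD_eq _ i (by simpa using hi)]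
  simp

theorem pvBfold (gd : List (String × List (String × List String))) (label : String)
    (hnd : (gd.map Prod.fst).Nodup) (hin : ∀ p ∈ gd, (p.2.map Prod.fst).Nodup)
    (textes anns : List String)
    (htx : textes = PySem.List.sorted (gd.map Prod.fst) (fun x => x) false)
    (han : anns = PySem.List.sorted (PySem.Set.ofList ((gd.map (fun p => p.2.map Prod.fst)).flatten)) (fun x => x) false) :
    gd.foldl (fun m p => p.2.foldl (fun m q =>
        if label ∈ q.2 then m.set ((pvPos textes).getD p.1 0) ((m.getD ((pvPos textes).getD p.1 0) []).set ((pvPos anns).getD q.1 0) 1) else m) m)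
      (textes.map (fun _ => List.replicate anns.length (0 : Int)))
    = textes.map (fun txt => anns.map (fun ann =>
        if label ∈ (PySem.Dict.mk ((PySem.Dict.mk gd).getD txt [])).getD ann [] then (1 : Int) else 0)) := by
  have han' : anns = PySem.List.sorted (PySem.Set.ofList (gd.flatMap (fun p => p.2.map Prod.fst))) (fun x => x) false := by
    rw [han, List.flatMap_def]
  have htnd : textes.Nodup := htx ▸ ((PySem.List.sorted_perm _ _ _).nodup_iff.mpr hnd)
  have hand : anns.Nodup := han ▸ ((PySem.List.sorted_perm _ _ _).nodup_iff.mpr (PySem.Set.nodup_ofList _))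
  have hm0 : pvShape (textes.map (fun _ => List.replicate anns.length (0 : Int))) textes.length anns.length := by
    constructor
    · simp
    · intro r hr
      obtain ⟨_, _, hre⟩ := List.mem_map.mp hr
      simp [← hre]
  have hb : ∀ p ∈ gd, (pvPos textes).getD p.1 0 < textes.length ∧
      ∀ q ∈ p.2, (pvPos anns).getD q.1 0 < anns.length := by
    intro p hp
    constructor
    · have hx : p.1 ∈ textes := by
        rw [htx, PySem.List.mem_sorted]; exact List.mem_map_of_mem hp
      obtain ⟨i, hi, _, hg⟩ := pvPos_getD_mem textes htnd p.1 hx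
      omega
    · intro q hq
      have hx : q.1 ∈ anns := by
        rw [han', PySem.List.mem_sorted, PySem.Set.mem_ofList]
        exact List.mem_flatMap.mpr ⟨p, hp, List.mem_map_of_mem hq⟩
      obtain ⟨j, hj, _, hg⟩ := pvPos_getD_mem anns hand q.1 hx
      omega
  obtain ⟨hS, hE⟩ := pvOuter_spec label (pvPos textes) (pvPos anns) anns.length gd
    (textes.map (fun _ => List.replicate anns.length (0 : Int))) textes.length hm0 hb
  apply List.ext_getElem
  · rw [hS.1]; simp
  · intro i hi1 hi2
    apply List.ext_getElem
    · rw [hS.2 _ (List.getElem_mem hi1)]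
      simp
    · intro j hj1 hj2
      have hiT : i < textes.length := by rw [hS.1] at hi1; exact hi1
      have hjA : j < anns.length := by
        have hm := List.getElem_mem hi1
        rw [hS.2 _ hm] at hj1; exact hj1
      have hL : (gd.foldl (fun m p => p.2.foldl (fun m q =>
          if label ∈ q.2 then m.set ((pvPos textes).getD p.1 0) ((m.getD ((pvPos textes).getD p.1 0) []).set ((pvPos anns).getD q.1 0) 1) else m) m)
        (textes.map (fun _ => List.replicate anns.length (0 : Int))))[i][j]
          = pvE (gd.foldl (fun m p => p.2.foldl (fun m q =>
          if label ∈ q.2 then m.set ((pvPos textes).getD p.1 0) ((m.getD ((pvPos textes).getD p.1 0) []).set ((pvPos anns).getD q.1 0) 1) else m) m)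
        (textes.map (fun _ => List.replicate anns.length (0 : Int)))) i j := by
        unfold pvE
        rw [pvGetD_eq _ i hi1, List.getD_eq_getElem?_getD, List.getElem?_eq_getElem hj1]
        simp
      rw [hL, hE i j, pvE_zero textes anns i j hiT]
      simp only [List.getElem_map]
      by_cases hH : ∃ p ∈ gd, (pvPos textes).getD p.1 0 = i ∧ ∃ q ∈ p.2, label ∈ q.2 ∧ (pvPos anns).getD q.1 0 = j
      · rw [if_pos hH, if_pos ((pvHit_iff gd label hnd hin textes anns htx han' i j hiT hjA).mp hH)]
      · rw [if_neg hH, if_neg (fun hc => hH ((pvHit_iff gd label hnd hin textes anns htx han' i j hiT hjA).mpr hc))]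

theorem pvMain (gd : List (String × List (String × List String))) (label : String)
    (hnd : (gd.map Prod.fst).Nodup) (hin : ∀ p ∈ gd, (p.2.map Prod.fst).Nodup) :
    construire_matrice_interannotateurs gd label = construire_matrice_interannotateurs_alt gd label := by
  unfold construire_matrice_interannotateurs construire_matrice_interannotateurs_alt
  simp only [PySem.Dict.keys_mk, PySem.Dict.values_mk, List.map_map, Function.comp_def,
    PySem.List.foldl_append_singleton_eq_map, List.nil_append, List.flatMap_def]
  have h1 := pvBfold gd label hnd hin
    (PySem.List.sorted (gd.map Prod.fst) (fun x => x) false)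
    (PySem.List.sorted (PySem.Set.ofList ((gd.map (fun p => p.2.map Prod.fst)).flatten)) (fun x => x) false)
    rfl rfl
  exact congrArg₂ Prod.mk h1.symm rfl


-- ===== VERDICT (by name: the statement is the Claim_ definition above) =====
theorem construire_matrice_interannotateurs_spec : Claim_equal_construire_matrice_interannotateurs := by
  intro gd label _ hpre
  unfold Spec_construire_matrice_interannotateurs
  exact pvMain gd label hpre.1 hpre.2
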